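-- pv_equiv track=rewrite | github.com/ceoptimize/mumps-graph | src/parsers/csv_parser.py | _extract_prefixes
-- ===== SOURCE A (Python) =====
-- from typing import Any, Dict, List, Optional
--
-- def _extract_prefixes(row: Dict[str, str]) -> List[str]:
--     """
--     Extract prefixes from a CSV row.
--
--     Args:
--         row: CSV row as dictionary
--
--     Returns:
--         List of prefix strings
--     """
--     prefixes_str = row.get("Prefixes", "").strip()
--     if not prefixes_str:
--         return []
--
--     # Handle multiple prefixes separated by commas or spaces
--     prefixes = []
--     # Split by comma first
--     parts = prefixes_str.split(",")
--     for part in parts: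
--         part = part.strip()
--         if part:
--             # Sometimes prefixes are space-separated within a part
--             sub_parts = part.split()
--             prefixes.extend(sub_parts)
--
--     # Clean up prefixes
--     cleaned_prefixes = []
--     for prefix in prefixes:
--         prefix = prefix.strip().upper()
--         # Remove any quotes or special characters
--         prefix = prefix.replace('"', "").replace("'", "")
--         if prefix and prefix != "N/A":
--             cleaned_prefixes.append(prefix)
--
--     return cleaned_prefixes
-- ===== SOURCE B (Python) =====
-- from typing import Dict, List
--
--
-- def _extract_prefixes(row: Dict[str, str]) -> List[str]:
--     """Extract prefixes from a CSV row.
--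
--     Single left-to-right character scan (a small state machine): separator
--     characters (comma or whitespace) flush the token built so far; quote
--     characters are skipped; every other character is uppercased and appended
--     to the current token.  No intermediate split lists are ever built.
--     """
--     out: List[str] = []
--     cur: List[str] = []
--
--     def flush() -> None:
--         token = "".join(cur)
--         cur.clear()
--         if token and token != "N/A":
--             out.append(token)
--
--     for ch in row.get("Prefixes", ""):
--         if ch == "," or ch.isspace():
--             flush()
--         elif ch not in '"\'':
--             cur.append(ch.upper())
--     flush()
--     return out
-- ===== Notes on version B (the rewrite author's own statement) =====
-- stated objective: alternative
-- what changed: B replaces A's three staged passes (split by comma, re-split each part by whitespace, then a cleaning loop with strip/upper/replace per token) by one character-level state machine: a single scan that flushes the current token at separator characters, skips quote characters, and uppercases the rest, so no intermediate split lists are built.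
import Mathlib
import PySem

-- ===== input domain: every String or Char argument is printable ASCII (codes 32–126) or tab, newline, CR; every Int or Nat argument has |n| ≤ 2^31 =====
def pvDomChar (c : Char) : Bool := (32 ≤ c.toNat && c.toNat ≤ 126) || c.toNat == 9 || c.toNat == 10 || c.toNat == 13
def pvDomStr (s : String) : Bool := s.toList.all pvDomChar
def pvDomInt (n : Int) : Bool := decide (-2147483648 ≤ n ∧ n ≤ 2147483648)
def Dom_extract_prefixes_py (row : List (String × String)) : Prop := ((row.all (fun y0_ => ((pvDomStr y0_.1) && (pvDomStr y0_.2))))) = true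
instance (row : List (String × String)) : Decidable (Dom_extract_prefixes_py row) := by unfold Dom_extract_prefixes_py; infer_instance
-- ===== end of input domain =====

-- B replaces A's staged split-by-comma / re-split-by-whitespace / per-token cleaning passes by a
-- single character-level scan with a token accumulator (flush at separators, skip quotes,
-- uppercase the rest); an alternative of the same cost.

-- ===== PORT A =====
def extract_prefixes_py (row : List (String × String)) : List String :=
  let prefixes_str := PySem.Str.strip (PySem.Dict.getD (PySem.Dict.mk row) "Prefixes" "")
  if prefixes_str = "" then []
  else
    -- s.split(",") with the literal non-empty separator "," (split? is none only for "")
    let parts := (PySem.Str.split? prefixes_str ",").getD []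
    let prefixes := parts.foldl (fun acc part =>
      let part' := PySem.Str.strip part
      if part' != "" then acc ++ PySem.Str.split₀ part' else acc) []
    prefixes.foldl (fun acc p =>
      let p1 := PySem.Str.replace (PySem.Str.replace (PySem.Str.upper (PySem.Str.strip p)) "\"" "") "'" ""
      if p1 != "" && p1 != "N/A" then acc ++ [p1] else acc) []

-- ===== PORT B =====
-- one scan over the characters; state = (emitted tokens, current token's cleaned chars);
-- flush = Source B's flush (join, drop if empty or "N/A"); ch.upper() on one ASCII char = upperChar
def extract_prefixes_py_alt (row : List (String × String)) : List String :=
  let s := PySem.Dict.getD (PySem.Dict.mk row) "Prefixes" ""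
  let st := s.toList.foldl (fun (p : List String × List Char) ch =>
      if ch = ',' || PySem.Chars.isspace ch then
        (let token := String.ofList p.2
         if token != "" && token != "N/A" then p.1 ++ [token] else p.1, [])
      else if ch = '"' || ch = '\'' then p
      else (p.1, p.2 ++ [PySem.Chars.upperChar ch])) ([], [])
  let token := String.ofList st.2
  if token != "" && token != "N/A" then st.1 ++ [token] else st.1

-- ===== PRECONDITION & SPEC =====
def Spec_extract_prefixes_py (row : List (String × String)) (out : List String) : Prop := out = extract_prefixes_py_alt row
instance (row : List (String × String)) (out : List String) : Decidable (Spec_extract_prefixes_py row out) := by unfold Spec_extract_prefixes_py; infer_instance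

-- ===== CLAIM (what is proved, stated in full; the proofs are below) =====
def Claim_equal_extract_prefixes_py : Prop := ∀ (row : List (String × String)), Dom_extract_prefixes_py row → Spec_extract_prefixes_py row (extract_prefixes_py row)

-- ===== LEMMAS AND PROOFS =====

-- A char is a separator for the joint tokenization: whitespace or a comma.
def pvSep (c : Char) : Bool := PySem.Chars.isspace c || c == ','

-- Per-char cleaning: quotes vanish, everything else is uppercased.
def pvClean (c : Char) : List Char :=
  if c = '"' || c = '\'' then [] else [PySem.Chars.upperChar c]

-- The kept-token predicate shared by both sides.
def pvKeep (u : String) : Bool := u != "" && u != "N/A"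

-- Reference word-splitter: words of s by separator predicate p, with the current
-- (reversed) word as accumulator.  `pvWsTok isspace s [] = Chars.split₀ s`.
def pvWsTok (p : Char → Bool) : List Char → List Char → List (List Char)
  | [], cur => if cur.isEmpty then [] else [cur.reverse]
  | c :: rest, cur =>
    if p c then
      (if cur.isEmpty then pvWsTok p rest [] else cur.reverse :: pvWsTok p rest [])
    else pvWsTok p rest (c :: cur)

-- Reference comma-splitter: (first piece, later pieces).
def pvCsplit : List Char → List Char × List (List Char)
  | [] => ([], [])
  | c :: rest =>
    let r := pvCsplit rest
    if c = ',' then ([], r.1 :: r.2) else (c :: r.1, r.2)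

-- B's scan as a tokenizer: emits every flushed accumulator (possibly empty) in order.
def pvScanTok : List Char → List Char → List (List Char)
  | [], cur => [cur]
  | c :: rest, cur =>
    if c = ',' || PySem.Chars.isspace c then cur :: pvScanTok rest []
    else if c = '"' || c = '\'' then pvScanTok rest cur
    else pvScanTok rest (cur ++ [PySem.Chars.upperChar c])

theorem pvSplit0_go_eq (s : List Char) : ∀ (cur : List Char) (acc : List (List Char)),
    PySem.Chars.split₀.go s cur acc = acc.reverse ++ pvWsTok PySem.Chars.isspace s cur := by
  induction s with
  | nil =>
    intro cur acc
    rw [PySem.Chars.split₀.go.eq_def]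
    by_cases h : cur.isEmpty <;> simp [pvWsTok, h]
  | cons c rest ih =>
    intro cur acc
    rw [PySem.Chars.split₀.go.eq_def]
    by_cases hc : PySem.Chars.isspace c
    · by_cases h : cur.isEmpty <;> simp [pvWsTok, hc, h, ih]
    · simp [pvWsTok, hc, ih]

theorem pvSplit0_eq (s : List Char) :
    PySem.Chars.split₀ s = pvWsTok PySem.Chars.isspace s [] := by
  simpa using pvSplit0_go_eq s [] []

theorem pvSplitOn_go_eq (s : List Char) : ∀ (fuel : Nat) (cur : List Char) (acc : List (List Char)),
    s.length < fuel →
    PySem.Chars.splitOn.go [','] fuel s cur acc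
      = acc.reverse ++ ((cur.reverse ++ (pvCsplit s).1) :: (pvCsplit s).2) := by
  induction s with
  | nil =>
    intro fuel cur acc hf
    rw [PySem.Chars.splitOn.go.eq_def]
    cases fuel with
    | zero => omega
    | succ f => simp [pvCsplit]
  | cons c rest ih =>
    intro fuel cur acc hf
    rw [PySem.Chars.splitOn.go.eq_def]
    cases fuel with
    | zero => omega
    | succ f =>
      by_cases hc : c = ','
      · subst hc
        have hpre : [','].isPrefixOf (',' :: rest) = true := by simp [List.isPrefixOf]
        simp only [hpre, if_pos, List.length_cons, List.length_nil, List.drop_succ_cons,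
          List.drop_zero]
        rw [ih f [] (cur.reverse :: acc) (Nat.lt_of_succ_lt_succ hf)]
        simp [pvCsplit]
      · have hpre : [','].isPrefixOf (c :: rest) = false := by
          simp [List.isPrefixOf]
          intro h
          exact (hc h.symm).elim
        simp only [hpre, Bool.false_eq_true, if_false]
        rw [ih f (c :: cur) acc (Nat.lt_of_succ_lt_succ hf)]
        simp [pvCsplit, hc]

theorem pvSplitOn_eq (s : List Char) :
    PySem.Chars.splitOn s [','] = (pvCsplit s).1 :: (pvCsplit s).2 := by
  have := pvSplitOn_go_eq s (s.length + 1) [] [] (by omega)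
  simpa [PySem.Chars.splitOn] using this

theorem pvReplace_go_one (ch : Char) (nw : List Char) (s : List Char) :
    ∀ (fuel : Nat) (acc : List Char), s.length ≤ fuel →
    PySem.Chars.replace.go [ch] nw fuel s acc
      = acc.reverse ++ s.flatMap (fun c => if c = ch then nw else [c]) := by
  induction s with
  | nil =>
    intro fuel acc hf
    rw [PySem.Chars.replace.go.eq_def]
    cases fuel <;> simp
  | cons c rest ih =>
    intro fuel acc hf
    rw [PySem.Chars.replace.go.eq_def]
    cases fuel with
    | zero => simp at hf
    | succ f =>
      by_cases hc : c = ch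
      · subst hc
        have hpre : [c].isPrefixOf (c :: rest) = true := by simp [List.isPrefixOf]
        simp only [hpre, if_pos, List.length_cons, List.length_nil, List.drop_succ_cons,
          List.drop_zero]
        rw [ih f (nw.reverse ++ acc) (Nat.le_of_succ_le_succ hf)]
        simp
      · have hpre : [ch].isPrefixOf (c :: rest) = false := by
          simp [List.isPrefixOf]
          intro h
          exact (hc h.symm).elim
        simp only [hpre, Bool.false_eq_true, if_false]
        rw [ih f (c :: acc) (Nat.le_of_succ_le_succ hf)]
        simp [hc]

theorem pvReplace_one (ch : Char) (nw : List Char) (s : List Char) :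
    PySem.Chars.replace s [ch] nw = s.flatMap (fun c => if c = ch then nw else [c]) := by
  have := pvReplace_go_one ch nw s s.length [] le_rfl
  simpa [PySem.Chars.replace] using this

theorem pvWsTok_all_sep (p : Char → Bool) (s : List Char) : ∀ cur : List Char,
    (∀ c ∈ s, p c) → pvWsTok p s cur = if cur.isEmpty then [] else [cur.reverse] := by
  induction s with
  | nil => intro cur _; simp [pvWsTok]
  | cons c rest ih =>
    intro cur hall
    have hc : p c := hall c (by simp)
    have hrest : ∀ d ∈ rest, p d := fun d hd => hall d (by simp [hd])
    by_cases h : cur.isEmpty <;> simp [pvWsTok, hc, h, ih [] hrest]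

theorem pvWsTok_append_sep (p : Char → Bool) (b : List Char)
    (hb : ∀ c ∈ b, p c) (a : List Char) : ∀ cur : List Char,
    pvWsTok p (a ++ b) cur = pvWsTok p a cur := by
  induction a with
  | nil =>
    intro cur
    rw [List.nil_append, pvWsTok_all_sep p b cur hb]
    simp [pvWsTok]
  | cons c rest ih =>
    intro cur
    by_cases hc : p c
    · by_cases h : cur.isEmpty <;> simp [pvWsTok, hc, h, ih]
    · simp [pvWsTok, hc, ih]

theorem pvWsTok_dropWhile (p q : Char → Bool) (hpq : ∀ c, q c = true → p c = true)
    (s : List Char) : pvWsTok p (s.dropWhile q) [] = pvWsTok p s [] := by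
  induction s with
  | nil => simp
  | cons c rest ih =>
    by_cases hq : q c
    · have hp : p c := hpq c hq
      simp [List.dropWhile, hq, pvWsTok, hp, ih]
    · simp [List.dropWhile, hq]

-- Stripping whitespace at either end does not change the words (p covers whitespace).
theorem pvWsTok_strip (p : Char → Bool) (hp : ∀ c, PySem.Chars.isspace c = true → p c = true)
    (s : List Char) : pvWsTok p (PySem.Chars.strip s) [] = pvWsTok p s [] := by
  have hstrip : PySem.Chars.strip s
      = ((s.dropWhile PySem.Chars.isspace).reverse.dropWhile PySem.Chars.isspace).reverse := rfl
  rw [hstrip]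
  have h2 : pvWsTok p (s.dropWhile PySem.Chars.isspace) [] = pvWsTok p s [] :=
    pvWsTok_dropWhile p PySem.Chars.isspace hp s
  rw [← h2]
  set t := s.dropWhile PySem.Chars.isspace with ht
  have hdecomp : t = (t.reverse.dropWhile PySem.Chars.isspace).reverse
      ++ (t.reverse.takeWhile PySem.Chars.isspace).reverse := by
    conv_lhs => rw [← t.reverse_reverse]
    conv_lhs => rw [← List.takeWhile_append_dropWhile
      (p := PySem.Chars.isspace) (l := t.reverse)]
    rw [List.reverse_append]
  conv_rhs => rw [hdecomp]
  rw [pvWsTok_append_sep p _ (by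
    intro c hc
    exact hp c (List.mem_takeWhile_imp (by simpa using hc)))]

-- Words produced by the splitter contain no separator chars and none of p's chars in cur.
theorem pvWsTok_tokens_clean (p : Char → Bool) (s : List Char) : ∀ cur : List Char,
    (∀ c ∈ cur, p c = false) →
    ∀ t ∈ pvWsTok p s cur, ∀ c ∈ t, p c = false := by
  induction s with
  | nil =>
    intro cur hcur t ht
    by_cases h : cur.isEmpty
    · simp [pvWsTok, h] at ht
    · simp [pvWsTok, h] at ht
      subst ht
      intro c hc
      exact hcur c (by simpa using hc)
  | cons c rest ih =>
    intro cur hcur t ht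
    by_cases hs : p c
    · by_cases h : cur.isEmpty
      · simp only [pvWsTok, hs, if_true, h] at ht
        exact ih [] (by simp) t ht
      · simp only [pvWsTok, hs, if_true, h, Bool.false_eq_true, if_false,
          List.mem_cons] at ht
        rcases ht with ht | ht
        · subst ht
          intro d hd
          exact hcur d (by simpa using hd)
        · exact ih [] (by simp) t ht
    · simp only [pvWsTok, hs, Bool.false_eq_true, if_false] at ht
      refine ih (c :: cur) ?_ t ht
      intro d hd
      rcases List.mem_cons.mp hd with h | h
      · subst h; simpa using hs
      · exact hcur d h

theorem pvStrip_of_clean (l : List Char) (h : ∀ c ∈ l, PySem.Chars.isspace c = false) :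
    PySem.Chars.strip l = l := by
  have h1 : l.dropWhile PySem.Chars.isspace = l := by
    rw [List.dropWhile_eq_self_iff]
    intro hl hc
    rw [h _ (List.getElem_mem hl)] at hc
    simp at hc
  have h2 : l.reverse.dropWhile PySem.Chars.isspace = l.reverse := by
    rw [List.dropWhile_eq_self_iff]
    intro hl hc
    rw [h _ (List.mem_reverse.mp (List.getElem_mem hl))] at hc
    simp at hc
  show ((l.dropWhile PySem.Chars.isspace).reverse.dropWhile PySem.Chars.isspace).reverse = l
  rw [h1, h2]
  simp

theorem pvStr_strip_of_clean (t : String)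
    (h : ∀ c ∈ t.toList, PySem.Chars.isspace c = false) : PySem.Str.strip t = t := by
  apply String.ext
  rw [PySem.Str.toList_strip, pvStrip_of_clean t.toList h]

-- The accumulating clean loop is a map-then-filter.
theorem pvFoldl_clean (g : String → String) (P : String → Bool) (xs : List String) :
    ∀ acc : List String,
    xs.foldl (fun acc x => if P (g x) then acc ++ [g x] else acc) acc
      = acc ++ (xs.map g).filter P := by
  induction xs with
  | nil => intro acc; simp
  | cons x rest ih =>
    intro acc
    by_cases h : P (g x) <;> simp [List.foldl_cons, h, ih]

-- The accumulating split loop flattens to words of the pieces (char level).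
theorem pvFoldl_parts (parts : List String) : ∀ acc : List String,
    List.map String.toList (parts.foldl (fun acc part =>
      let part' := PySem.Str.strip part
      if part' != "" then acc ++ PySem.Str.split₀ part' else acc) acc)
      = List.map String.toList acc
        ++ parts.flatMap (fun part => pvWsTok PySem.Chars.isspace part.toList []) := by
  induction parts with
  | nil => intro acc; simp
  | cons part rest ih =>
    intro acc
    simp only [List.foldl_cons, List.flatMap_cons]
    by_cases h : PySem.Str.strip part != ""
    · rw [if_pos h, ih]
      have hx : List.map String.toList (acc ++ PySem.Str.split₀ (PySem.Str.strip part))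
          = List.map String.toList acc
            ++ pvWsTok PySem.Chars.isspace part.toList [] := by
        rw [List.map_append, PySem.Str.split₀_map_toList, PySem.Str.toList_strip,
          pvSplit0_eq, pvWsTok_strip PySem.Chars.isspace (fun _ h => h)]
      rw [hx, List.append_assoc]
    · rw [if_neg h, ih]
      have hem : (PySem.Str.strip part).toList = [] := by
        simp only [bne, Bool.not_eq_true'] at h
        have : PySem.Str.strip part = "" := by simpa using h
        simp [this]
      have hz : pvWsTok PySem.Chars.isspace part.toList [] = [] := by
        rw [← pvWsTok_strip PySem.Chars.isspace (fun _ h => h) part.toList,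
          ← PySem.Str.toList_strip, hem]
        simp [pvWsTok]
      rw [hz]
      simp

-- Flattening the whitespace-words of the comma-pieces = words by pvSep.
theorem pvCsplit_flat (s : List Char) : ∀ cur : List Char,
    pvWsTok PySem.Chars.isspace (pvCsplit s).1 cur
      ++ ((pvCsplit s).2).flatMap (fun q => pvWsTok PySem.Chars.isspace q [])
      = pvWsTok pvSep s cur := by
  induction s with
  | nil => intro cur; by_cases h : cur.isEmpty <;> simp [pvCsplit, pvWsTok, h]
  | cons c rest ih =>
    intro cur
    by_cases hc : c = ','
    · subst hc
      have hsep : pvSep ',' = true := by decide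
      have h0 := ih []
      by_cases h : cur.isEmpty <;>
        simp [pvCsplit, pvWsTok, hsep, h, ← h0]
    · by_cases hs : PySem.Chars.isspace c
      · have hsep : pvSep c = true := by simp [pvSep, hs]
        have h0 := ih []
        by_cases h : cur.isEmpty <;>
          simp [pvCsplit, pvWsTok, hc, hs, hsep, h, ← h0]
      · have hsep : pvSep c = false := by
          simp [pvSep, hs]
          simpa using hc
        simpa [pvCsplit, pvWsTok, hc, hs, hsep] using ih (c :: cur)

-- Uppercasing cannot turn a non-quote char into a quote.
theorem pvUpper_ne_quote (q c : Char) (hq : q = '"' ∨ q = '\'')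
    (h : ¬ c = q) : ¬ PySem.Chars.upperChar c = q := by
  unfold PySem.Chars.upperChar
  split_ifs with hl
  · simp only [PySem.Chars.islower, Bool.and_eq_true, decide_eq_true_eq] at hl
    have h1 : ('a').toNat ≤ c.toNat := Char.le_def.mp hl.1
    have h2 : c.toNat ≤ ('z').toNat := Char.le_def.mp hl.2
    have ha : ('a').toNat = 97 := rfl
    have hz : ('z').toNat = 122 := rfl
    intro he
    have hv : Nat.isValidChar (c.toNat - 32) := Or.inl (by omega)
    have := congrArg Char.toNat he
    rw [Char.toNat_ofNat, if_pos hv] at this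
    have hqn : q.toNat = 34 ∨ q.toNat = 39 := by
      rcases hq with hq | hq <;> subst hq <;> [left; right] <;> rfl
    omega
  · exact h

-- A's string-level cleaning of a token is the per-char pvClean map.
theorem pvCleanA_eq (t : List Char) :
    (PySem.Str.replace (PySem.Str.replace (PySem.Str.upper (String.ofList t)) "\"" "") "'" "").toList
      = t.flatMap pvClean := by
  have hq : ("\"" : String).toList = ['"'] := rfl
  have ha : ("'" : String).toList = ['\''] := rfl
  have he : ("" : String).toList = [] := rfl
  rw [PySem.Str.toList_replace, PySem.Str.toList_replace, PySem.Str.toList_upper, ha, hq, he]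
  have hu : PySem.Chars.upper (String.ofList t).toList = List.map PySem.Chars.upperChar t := by
    rw [String.toList_ofList]; rfl
  rw [hu, pvReplace_one, pvReplace_one, List.flatMap_map, List.flatMap_assoc]
  apply List.flatMap_congr
  intro c _
  by_cases h1 : c = '"'
  · subst h1; rfl
  · by_cases h2 : c = '\''
    · subst h2; rfl
    · have n1 : ¬ PySem.Chars.upperChar c = '"' := pvUpper_ne_quote _ c (Or.inl rfl) h1
      have n2 : ¬ PySem.Chars.upperChar c = '\'' := pvUpper_ne_quote _ c (Or.inr rfl) h2
      simp [pvClean, h1, h2, n1, n2]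

-- B's fold-with-final-flush emits exactly the kept tokens of the scan tokenizer.
theorem pvScanFold (s : List Char) : ∀ (out : List String) (cur : List Char),
    (let st := s.foldl (fun (p : List String × List Char) ch =>
        if ch = ',' || PySem.Chars.isspace ch then
          (let token := String.ofList p.2
           if token != "" && token != "N/A" then p.1 ++ [token] else p.1, [])
        else if ch = '"' || ch = '\'' then p
        else (p.1, p.2 ++ [PySem.Chars.upperChar ch])) (out, cur)
     let token := String.ofList st.2
     if token != "" && token != "N/A" then st.1 ++ [token] else st.1)
      = out ++ ((pvScanTok s cur).map String.ofList).filter pvKeep := by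
  induction s with
  | nil =>
    intro out cur
    show (if pvKeep (String.ofList cur) then out ++ [String.ofList cur] else out)
        = out ++ ([String.ofList cur].filter pvKeep)
    by_cases h : pvKeep (String.ofList cur) <;> simp [h]
  | cons c rest ih =>
    intro out cur
    by_cases h1 : (c = ',' || PySem.Chars.isspace c)
    · simp only [List.foldl_cons, h1, if_true, pvScanTok]
      rw [ih]
      by_cases h : pvKeep (String.ofList cur) <;>
        simp_all [pvKeep]
    · by_cases h2 : (c = '"' || c = '\'')
      · simp only [List.foldl_cons, h1, Bool.false_eq_true, if_false, h2, if_true, pvScanTok]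
        rw [ih]
      · simp only [List.foldl_cons, h1, h2, Bool.false_eq_true, if_false, pvScanTok]
        rw [ih]

-- The kept tokens of B's scan are the kept cleaned words of the pvSep splitter.
theorem pvScanTok_emit (s : List Char) : ∀ rcur : List Char,
    ((pvScanTok s (rcur.reverse.flatMap pvClean)).map String.ofList).filter pvKeep
      = (((pvWsTok pvSep s rcur).map (fun t => String.ofList (t.flatMap pvClean))).map id).filter pvKeep := by
  induction s with
  | nil =>
    intro rcur
    by_cases h : rcur.isEmpty
    · have : rcur = [] := by simpa [List.isEmpty_iff] using h
      subst this
      simp [pvScanTok, pvWsTok, pvKeep]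
    · simp [pvScanTok, pvWsTok, h]
  | cons c rest ih =>
    intro rcur
    by_cases h1 : (c = ',' || PySem.Chars.isspace c)
    · have hsep : pvSep c = true := by
        rcases Bool.or_eq_true_iff.mp h1 with h | h
        · have : c = ',' := by simpa using h
          subst this; decide
        · simp [pvSep, h]
      by_cases h : rcur.isEmpty
      · have hrc : rcur = [] := by simpa [List.isEmpty_iff] using h
        subst hrc
        have := ih []
        simp only [pvScanTok, h1, if_true, pvWsTok, hsep, List.isEmpty_nil, List.map_cons,
          List.filter_cons]
        have hk : pvKeep (String.ofList ([].reverse.flatMap pvClean)) = false := by decide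
        simp only [List.reverse_nil, List.flatMap_nil] at hk ⊢
        rw [hk]
        simpa using this
      · have := ih []
        simp only [pvScanTok, h1, if_true, pvWsTok, hsep, h, Bool.false_eq_true, if_false,
          List.map_cons, List.filter_cons, id]
        simp only [List.reverse_nil, List.flatMap_nil] at this
        by_cases hk : pvKeep (String.ofList (rcur.reverse.flatMap pvClean)) <;>
          simp [hk, this]
    · have hc1 : ¬ c = ',' := by
        intro h; apply h1; simp [h]
      have hc2 : ¬ PySem.Chars.isspace c = true := by
        intro h; apply h1; simp [h]
      have hsep : pvSep c = false := by
        simp [pvSep, hc2]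
        simpa using hc1
      by_cases h2 : (c = '"' || c = '\'')
      · have hcl : pvClean c = [] := by
          simp only [pvClean, h2, if_true]
        simp only [pvScanTok, h1, Bool.false_eq_true, if_false, h2, if_true, pvWsTok, hsep]
        have := ih (c :: rcur)
        simp only [List.reverse_cons, List.flatMap_append, List.flatMap_cons,
          List.flatMap_nil, hcl, List.append_nil] at this
        exact this
      · have hcl : pvClean c = [PySem.Chars.upperChar c] := by
          simp only [pvClean, h2, Bool.false_eq_true, if_false]
        simp only [pvScanTok, h1, h2, Bool.false_eq_true, if_false, pvWsTok, hsep]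
        have := ih (c :: rcur)
        simp only [List.reverse_cons, List.flatMap_append, List.flatMap_cons,
          List.flatMap_nil, hcl, List.append_nil] at this
        exact this

-- ===== VERDICT (by name: the statement is the Claim_ definition above) =====
set_option maxHeartbeats 1000000 in
theorem extract_prefixes_py_spec : Claim_equal_extract_prefixes_py := by
  intro row _
  show extract_prefixes_py row = extract_prefixes_py_alt row
  unfold extract_prefixes_py extract_prefixes_py_alt
  set s := PySem.Dict.getD (PySem.Dict.mk row) "Prefixes" "" with hs
  rw [pvScanFold s.toList [] []]
  simp only [List.nil_append]
  have hscan : ((pvScanTok s.toList []).map String.ofList).filter pvKeep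
      = ((pvWsTok pvSep s.toList []).map (fun t => String.ofList (t.flatMap pvClean))).filter pvKeep := by
    have := pvScanTok_emit s.toList []
    simpa using this
  rw [hscan]
  by_cases h0 : PySem.Str.strip s = ""
  · rw [if_pos h0]
    have hz : pvWsTok pvSep s.toList [] = [] := by
      rw [← pvWsTok_strip pvSep (by intro c hc; simp [pvSep, hc]) s.toList,
        ← PySem.Str.toList_strip, h0]
      simp [pvWsTok]
    rw [hz]
    simp
  · rw [if_neg h0]
    -- A's token list (as strings) has char-level value pvWsTok pvSep s.toList []
    have hparts : List.map String.toList ((PySem.Str.split? (PySem.Str.strip s) ",").getD [])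
        = (pvCsplit (PySem.Str.strip s).toList).1 :: (pvCsplit (PySem.Str.strip s).toList).2 := by
      have hb := PySem.Str.split?_map (PySem.Str.strip s) ","
      have hch : PySem.Chars.split? (PySem.Str.strip s).toList (("," : String).toList)
          = some (PySem.Chars.splitOn (PySem.Str.strip s).toList [',']) := rfl
      rw [hch] at hb
      cases hsp : PySem.Str.split? (PySem.Str.strip s) "," with
      | none => rw [hsp] at hb; simp at hb
      | some ps =>
        rw [hsp] at hb
        simp only [Option.map_some, Option.some.injEq] at hb
        rw [Option.getD_some, hb, pvSplitOn_eq]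
    have htoks : List.map String.toList
        (((PySem.Str.split? (PySem.Str.strip s) ",").getD []).foldl (fun acc part =>
          let part' := PySem.Str.strip part
          if part' != "" then acc ++ PySem.Str.split₀ part' else acc) [])
        = pvWsTok pvSep s.toList [] := by
      rw [pvFoldl_parts]
      rw [← List.flatMap_map (f := String.toList)
        (g := fun l => pvWsTok PySem.Chars.isspace l []), hparts]
      rw [List.flatMap_cons]
      have := pvCsplit_flat (PySem.Str.strip s).toList []
      rw [this]
      rw [PySem.Str.toList_strip, pvWsTok_strip pvSep (by intro c hc; simp [pvSep, hc])]
      simp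
    set prefixes := ((PySem.Str.split? (PySem.Str.strip s) ",").getD []).foldl (fun acc part =>
      let part' := PySem.Str.strip part
      if part' != "" then acc ++ PySem.Str.split₀ part' else acc) [] with hpref
    rw [pvFoldl_clean (fun p => PySem.Str.replace (PySem.Str.replace
      (PySem.Str.upper (PySem.Str.strip p)) "\"" "") "'" "") (fun u => u != "" && u != "N/A")]
    rw [List.nil_append]
    have hP : (fun u => u != "" && u != "N/A") = pvKeep := by
      funext u; rfl
    rw [hP]
    -- map A's clean over prefixes = map (ofList ∘ flatMap pvClean) over the raw tokens
    have hclean : ∀ t ∈ prefixes, ∀ c ∈ t.toList, PySem.Chars.isspace c = false := by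
      intro t ht c hc
      have hmem : t.toList ∈ List.map String.toList prefixes := List.mem_map_of_mem ht
      rw [htoks] at hmem
      have hno := pvWsTok_tokens_clean pvSep s.toList [] (by simp) t.toList hmem c hc
      by_contra hcon
      rw [Bool.not_eq_false] at hcon
      have : pvSep c = true := by simp [pvSep, hcon]
      rw [hno] at this
      simp at this
    have hmapeq : prefixes.map (fun p => PySem.Str.replace (PySem.Str.replace
        (PySem.Str.upper (PySem.Str.strip p)) "\"" "") "'" "")
        = (pvWsTok pvSep s.toList []).map (fun t => String.ofList (t.flatMap pvClean)) := by
      have hmapped := congrArg (List.map (fun t => String.ofList (t.flatMap pvClean))) htoks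
      rw [List.map_map] at hmapped
      rw [← hmapped]
      apply List.map_congr_left
      intro t ht
      rw [pvStr_strip_of_clean t (hclean t ht)]
      apply String.ext
      have := pvCleanA_eq t.toList
      simpa using this
    rw [hmapeq]
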